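-- pv_equiv track=rewrite | github.com/CodeSemDataset/CodeSem | scripts/tokens/token_alias/refine_alias/refine.py | getRealName
-- ===== SOURCE A (Python) =====
-- def getRealName(name):
--     id=len(name)
--     special_symbols=['+','-','.','->','[']
--     for symbol in special_symbols:
--         split_index=name.find(symbol)
--         if split_index>=0:
--             id=min(id,split_index)
--     real_name=name[:id].strip('*&() ')
--     return real_name
-- ===== SOURCE B (Python) =====
-- def getRealName(name):
--     id = len(name)
--     for i, ch in enumerate(name):
--         if ch in {'+', '-', '.', '['}:
--             id = i
--             break
--     return name[:id].strip('*&() ')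
-- ===== Notes on version B (the rewrite author's own statement) =====
-- stated objective: simpler
-- what changed: B replaces A's five independent whole-string find() scans (one per delimiter substring, including the arrow one that is redundant given the lone hyphen) by a single left-to-right enumerate-and-break pass that stops at the first single-character delimiter, then applies the same prefix slice and strip as A.
import Mathlib
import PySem

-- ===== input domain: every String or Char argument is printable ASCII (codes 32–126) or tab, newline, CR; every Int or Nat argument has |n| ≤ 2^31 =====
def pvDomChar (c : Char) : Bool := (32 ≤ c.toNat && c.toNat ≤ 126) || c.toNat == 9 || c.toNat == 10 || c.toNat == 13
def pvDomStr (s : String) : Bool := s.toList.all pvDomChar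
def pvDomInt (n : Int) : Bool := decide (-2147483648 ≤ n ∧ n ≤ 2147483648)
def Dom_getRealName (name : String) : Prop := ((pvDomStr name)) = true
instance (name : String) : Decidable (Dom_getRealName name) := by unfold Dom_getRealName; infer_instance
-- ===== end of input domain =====

-- B replaces A's five whole-string find() scans by ONE left-to-right character scan
-- (first delimiter index; '->' is redundant given '-'); objective: simpler.

-- ===== PORT A =====
def getRealName (name : String) : String :=
  let id0 : Int := PySem.Str.len name
  let id := ["+", "-", ".", "->", "["].foldl
    (fun id symbol =>
      let splitIndex := PySem.Str.find name symbol
      if 0 ≤ splitIndex then min id splitIndex else id) id0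
  PySem.Str.stripChars (PySem.Str.slice name none (some id)) "*&() "

-- ===== PORT B =====
def pvIsDelim (c : Char) : Bool := c == '+' || c == '-' || c == '.' || c == '['

-- the enumerate-and-break loop of Source B: index of the first delimiter char, else len(name)
def pvFindDelim : List Char → Int → Int
  | [], i => i
  | c :: cs, i => if pvIsDelim c then i else pvFindDelim cs (i + 1)

def getRealName_alt (name : String) : String :=
  let id := pvFindDelim name.toList 0
  PySem.Str.stripChars (PySem.Str.slice name none (some id)) "*&() "

-- ===== PRECONDITION & SPEC =====
def Spec_getRealName (name : String) (out : String) : Prop := out = getRealName_alt name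
instance (name : String) (out : String) : Decidable (Spec_getRealName name out) := by unfold Spec_getRealName; infer_instance

-- ===== CLAIM (what is proved, stated in full; the proofs are below) =====
def Claim_equal_getRealName : Prop := ∀ (name : String), Dom_getRealName name → Spec_getRealName name (getRealName name)

-- ===== LEMMAS AND PROOFS =====

-- the Nat value B's loop computes from accumulator 0
def pvDIdx (s : List Char) : Nat := (s.takeWhile (fun c => !pvIsDelim c)).length

-- A's loop body
def pvStep (a f : Int) : Int := if 0 ≤ f then min a f else a

theorem pvFindDelim_eq (s : List Char) (i : Int) : pvFindDelim s i = i + (pvDIdx s : Int) := by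
  induction s generalizing i with
  | nil => simp [pvFindDelim, pvDIdx]
  | cons c cs ih =>
    by_cases h : pvIsDelim c = true
    · simp [pvFindDelim, pvDIdx, List.takeWhile, h]
    · simp only [pvFindDelim, pvDIdx, List.takeWhile] at *
      simp only [h, Bool.not_false, ih, List.length_cons]
      push_cast
      ring

theorem pvDIdx_le (s : List Char) : pvDIdx s ≤ s.length :=
  (s.takeWhile_sublist _).length_le

theorem pvDIdx_before (s : List Char) (i : Nat) (h : i < pvDIdx s) :
    ∃ c, s[i]? = some c ∧ pvIsDelim c = false := by
  induction s generalizing i with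
  | nil => simp [pvDIdx] at h
  | cons a as ih =>
    by_cases ha : pvIsDelim a = true
    · simp [pvDIdx, List.takeWhile, ha] at h
    · cases i with
      | zero => exact ⟨a, by simp, by simpa using ha⟩
      | succ j =>
        simp only [pvDIdx, List.takeWhile, ha, Bool.not_false, List.length_cons] at h
        obtain ⟨c, hc, hcd⟩ := ih j (by simpa [pvDIdx] using Nat.lt_of_succ_lt_succ h)
        exact ⟨c, by simpa using hc, hcd⟩

theorem pvDIdx_at (s : List Char) (h : pvDIdx s < s.length) :
    ∃ c, s[pvDIdx s]? = some c ∧ pvIsDelim c = true := by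
  induction s with
  | nil => simp at h
  | cons a as ih =>
    by_cases ha : pvIsDelim a = true
    · exact ⟨a, by simp [pvDIdx, List.takeWhile, ha], ha⟩
    · simp only [pvDIdx, List.takeWhile, ha, Bool.not_false, List.length_cons] at h ⊢
      obtain ⟨c, hc, hcd⟩ := ih (by simpa [pvDIdx] using Nat.lt_of_succ_lt_succ h)
      exact ⟨c, by simpa [pvDIdx] using hc, hcd⟩

theorem prefix_head {c : Char} {r t : List Char} (h : (c :: r) <+: t) :
    t.head? = some c := by
  obtain ⟨u, hu⟩ := h
  subst hu; rfl

-- any find whose pattern starts with a delimiter char lands at or after pvDIdx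
theorem find_ge_dIdx (s : List Char) (c : Char) (r : List Char)
    (hc : pvIsDelim c = true) (hf : 0 ≤ PySem.Chars.find s (c :: r)) :
    (pvDIdx s : Int) ≤ PySem.Chars.find s (c :: r) := by
  have hspec := PySem.Chars.find_spec (s := s) (sub := c :: r) hf
  by_contra hlt
  push Not at hlt
  have hidx : (PySem.Chars.find s (c :: r)).toNat < pvDIdx s := by omega
  obtain ⟨d, hd, hdd⟩ := pvDIdx_before s _ hidx
  have hh := prefix_head hspec.1
  rw [List.head?_drop, hd] at hh
  cases hh
  rw [hc] at hdd; cases hdd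

-- the delimiter sitting at pvDIdx is found at or before pvDIdx
theorem find_le_dIdx (s : List Char) (d : Char)
    (hd : s[pvDIdx s]? = some d) :
    0 ≤ PySem.Chars.find s [d] ∧ PySem.Chars.find s [d] ≤ (pvDIdx s : Int) := by
  have hpre : [d] <+: s.drop (pvDIdx s) := by
    cases ht : s.drop (pvDIdx s) with
    | nil => rw [← List.head?_drop, ht] at hd; cases hd
    | cons a as =>
      rw [← List.head?_drop, ht] at hd
      cases hd
      exact ⟨as, rfl⟩
  have hmem : d ∈ s := List.mem_of_getElem? hd
  have hnn : 0 ≤ PySem.Chars.find s [d] := by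
    rw [PySem.Chars.find_nonneg_iff]
    exact (List.singleton_infix_iff d s).mpr hmem
  refine ⟨hnn, ?_⟩
  have hspec := PySem.Chars.find_spec (s := s) (sub := [d]) hnn
  by_contra hgt
  push Not at hgt
  exact hspec.2 (pvDIdx s) (by omega) hpre

theorem pvStep_le_self (a f : Int) : pvStep a f ≤ a := by
  unfold pvStep; split_ifs <;> omega

theorem pvStep_le_f (a f : Int) (h : 0 ≤ f) : pvStep a f ≤ f := by
  unfold pvStep; split_ifs <;> omega

theorem pvStep_ge (a f k : Int) (ha : k ≤ a) (hf : 0 ≤ f → k ≤ f) : k ≤ pvStep a f := by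
  unfold pvStep; split_ifs with h
  · have := hf h; omega
  · exact ha

theorem pvId_eq (s : List Char) :
    (["+", "-", ".", "->", "["].foldl
      (fun id symbol =>
        if 0 ≤ PySem.Chars.find s symbol.toList then min id (PySem.Chars.find s symbol.toList)
        else id) (s.length : Int))
      = pvFindDelim s 0 := by
  rw [pvFindDelim_eq]
  set k : Nat := pvDIdx s with hk
  set f1 := PySem.Chars.find s ['+']
  set f2 := PySem.Chars.find s ['-']
  set f3 := PySem.Chars.find s ['.']
  set f4 := PySem.Chars.find s ['-', '>']
  set f5 := PySem.Chars.find s ['[']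
  have e : (["+", "-", ".", "->", "["].foldl
      (fun id symbol =>
        let splitIndex := PySem.Chars.find s symbol.toList
        if 0 ≤ splitIndex then min id splitIndex else id) (s.length : Int))
      = pvStep (pvStep (pvStep (pvStep (pvStep (s.length : Int) f1) f2) f3) f4) f5 := rfl
  rw [e]
  have h1 := find_ge_dIdx s '+' [] (by decide)
  have h2 := find_ge_dIdx s '-' [] (by decide)
  have h3 := find_ge_dIdx s '.' [] (by decide)
  have h4 := find_ge_dIdx s '-' ['>'] (by decide)
  have h5 := find_ge_dIdx s '[' [] (by decide)
  have hge : (k : Int) ≤ pvStep (pvStep (pvStep (pvStep (pvStep (s.length : Int) f1) f2) f3) f4) f5 := by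
    apply pvStep_ge _ _ _ (pvStep_ge _ _ _ (pvStep_ge _ _ _ (pvStep_ge _ _ _ (pvStep_ge _ _ _ ?_ h1) h2) h3) h4) h5
    exact_mod_cast pvDIdx_le s
  have hle : pvStep (pvStep (pvStep (pvStep (pvStep (s.length : Int) f1) f2) f3) f4) f5 ≤ (k : Int) := by
    by_cases hlt : k < s.length
    · obtain ⟨d, hd, hdelim⟩ := pvDIdx_at s hlt
      have hdc : ((d = '+' ∨ d = '-') ∨ d = '.') ∨ d = '[' := by
        simpa [pvIsDelim] using hdelim
      rcases hdc with ((h | h) | h) | h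
      · subst h
        obtain ⟨hnn, hle'⟩ := find_le_dIdx s '+' hd
        calc pvStep (pvStep (pvStep (pvStep (pvStep (s.length : Int) f1) f2) f3) f4) f5
            ≤ pvStep (pvStep (pvStep (pvStep (s.length : Int) f1) f2) f3) f4 := pvStep_le_self _ _
          _ ≤ pvStep (pvStep (pvStep (s.length : Int) f1) f2) f3 := pvStep_le_self _ _
          _ ≤ pvStep (pvStep (s.length : Int) f1) f2 := pvStep_le_self _ _
          _ ≤ pvStep (s.length : Int) f1 := pvStep_le_self _ _
          _ ≤ f1 := pvStep_le_f _ _ hnn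
          _ ≤ (k : Int) := hle'
      · subst h
        obtain ⟨hnn, hle'⟩ := find_le_dIdx s '-' hd
        calc pvStep (pvStep (pvStep (pvStep (pvStep (s.length : Int) f1) f2) f3) f4) f5
            ≤ pvStep (pvStep (pvStep (pvStep (s.length : Int) f1) f2) f3) f4 := pvStep_le_self _ _
          _ ≤ pvStep (pvStep (pvStep (s.length : Int) f1) f2) f3 := pvStep_le_self _ _
          _ ≤ pvStep (pvStep (s.length : Int) f1) f2 := pvStep_le_self _ _
          _ ≤ f2 := pvStep_le_f _ _ hnn
          _ ≤ (k : Int) := hle'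
      · subst h
        obtain ⟨hnn, hle'⟩ := find_le_dIdx s '.' hd
        calc pvStep (pvStep (pvStep (pvStep (pvStep (s.length : Int) f1) f2) f3) f4) f5
            ≤ pvStep (pvStep (pvStep (pvStep (s.length : Int) f1) f2) f3) f4 := pvStep_le_self _ _
          _ ≤ pvStep (pvStep (pvStep (s.length : Int) f1) f2) f3 := pvStep_le_self _ _
          _ ≤ f3 := pvStep_le_f _ _ hnn
          _ ≤ (k : Int) := hle'
      · subst h
        obtain ⟨hnn, hle'⟩ := find_le_dIdx s '[' hd
        calc pvStep (pvStep (pvStep (pvStep (pvStep (s.length : Int) f1) f2) f3) f4) f5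
            ≤ f5 := pvStep_le_f _ _ hnn
          _ ≤ (k : Int) := hle'
    · have hkl : k = s.length := le_antisymm (pvDIdx_le s) (le_of_not_gt hlt)
      calc pvStep (pvStep (pvStep (pvStep (pvStep (s.length : Int) f1) f2) f3) f4) f5
          ≤ pvStep (pvStep (pvStep (pvStep (s.length : Int) f1) f2) f3) f4 := pvStep_le_self _ _
        _ ≤ pvStep (pvStep (pvStep (s.length : Int) f1) f2) f3 := pvStep_le_self _ _
        _ ≤ pvStep (pvStep (s.length : Int) f1) f2 := pvStep_le_self _ _
        _ ≤ pvStep (s.length : Int) f1 := pvStep_le_self _ _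
        _ ≤ (s.length : Int) := pvStep_le_self _ _
        _ = (k : Int) := by rw [hkl]
  omega

-- ===== VERDICT (by name: the statement is the Claim_ definition above) =====
theorem getRealName_spec : Claim_equal_getRealName := by
  intro name _
  unfold Spec_getRealName getRealName getRealName_alt
  simp only [PySem.Str.find_eq, PySem.Str.len_eq]
  rw [pvId_eq name.toList]
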